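-- pv_equiv track=rewrite | github.com/RamananVr/Leetcodepython | arrays/2615_sum_of_distances.py | sumOfDistances
-- ===== SOURCE A (Python) =====
-- def sumOfDistances(nums):
--     """
--     Calculate the sum of absolute differences for each element in the array.
--
--     Args:
--     nums (List[int]): The input array.
--
--     Returns:
--     List[int]: The array containing the sum of absolute differences for each element.
--     """
--     n = len(nums)
--     nums_sorted = sorted((num, i) for i, num in enumerate(nums))
--     sorted_nums = [num for num, _ in nums_sorted]
--     indices = [i for _, i in nums_sorted]
--
--     prefix_sum = [0] * n
--     suffix_sum = [0] * n
--
--     # Calculate prefix sums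
--     prefix_sum[0] = sorted_nums[0]
--     for i in range(1, n):
--         prefix_sum[i] = prefix_sum[i - 1] + sorted_nums[i]
--
--     # Calculate suffix sums
--     suffix_sum[n - 1] = sorted_nums[n - 1]
--     for i in range(n - 2, -1, -1):
--         suffix_sum[i] = suffix_sum[i + 1] + sorted_nums[i]
--
--     # Calculate the result
--     result = [0] * n
--     for i in range(n):
--         left_sum = sorted_nums[i] * i - prefix_sum[i - 1] if i > 0 else 0
--         right_sum = suffix_sum[i + 1] - sorted_nums[i] * (n - i - 1) if i < n - 1 else 0
--         result[indices[i]] = left_sum + right_sum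
--
--     return result
-- ===== SOURCE B (Python) =====
-- def sumOfDistances(nums):
--     """Direct one-liner: for each element, sum the absolute differences to all elements."""
--     return [sum(abs(x - y) for y in nums) for x in nums]
-- ===== Notes on version B (the rewrite author's own statement) =====
-- stated objective: simpler
-- what changed: B replaces A's sort-with-indices plus prefix/suffix-sum machinery by the literal definition: one nested comprehension summing abs(x - y) over all pairs, in original order.
import Mathlib
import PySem

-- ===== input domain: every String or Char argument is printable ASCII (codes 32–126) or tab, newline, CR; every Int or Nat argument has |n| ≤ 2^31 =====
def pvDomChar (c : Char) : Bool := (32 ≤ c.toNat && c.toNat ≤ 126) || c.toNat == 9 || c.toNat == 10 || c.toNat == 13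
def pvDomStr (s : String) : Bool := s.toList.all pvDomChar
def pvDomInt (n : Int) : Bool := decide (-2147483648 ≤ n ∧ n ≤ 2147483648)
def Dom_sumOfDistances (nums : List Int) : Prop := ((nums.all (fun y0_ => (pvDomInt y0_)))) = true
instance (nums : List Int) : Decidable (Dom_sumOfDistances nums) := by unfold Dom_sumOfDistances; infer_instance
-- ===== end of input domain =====

-- B replaces A's sort-with-indices plus prefix/suffix-sum machinery by the literal definition
-- (one nested comprehension summing abs differences); simpler, not faster.

-- ===== PORT A =====
def sumOfDistances (nums : List Int) : List Int :=
  let n : Int := nums.length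
  let nums_sorted := PySem.List.sorted2 ((PySem.List.enumerate nums).map (fun p => (p.2, p.1))) Prod.fst Prod.snd
  let sorted_nums := nums_sorted.map Prod.fst
  let indices := nums_sorted.map Prod.snd
  let prefix_sum : List Int := List.replicate nums.length 0
  let suffix_sum : List Int := List.replicate nums.length 0
  let prefix_sum := PySem.List.pySetD prefix_sum 0 (PySem.List.pyGetD sorted_nums 0 0)
  let prefix_sum := (PySem.List.pyRange 1 n 1).foldl
    (fun ps i => PySem.List.pySetD ps i (PySem.List.pyGetD ps (i - 1) 0 + PySem.List.pyGetD sorted_nums i 0)) prefix_sum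
  let suffix_sum := PySem.List.pySetD suffix_sum (n - 1) (PySem.List.pyGetD sorted_nums (n - 1) 0)
  let suffix_sum := (PySem.List.pyRange (n - 2) (-1) (-1)).foldl
    (fun ss i => PySem.List.pySetD ss i (PySem.List.pyGetD ss (i + 1) 0 + PySem.List.pyGetD sorted_nums i 0)) suffix_sum
  let result : List Int := List.replicate nums.length 0
  (PySem.List.pyRange 0 n 1).foldl
    (fun res i =>
      let left_sum := if i > 0 then PySem.List.pyGetD sorted_nums i 0 * i - PySem.List.pyGetD prefix_sum (i - 1) 0 else 0
      let right_sum := if i < n - 1 then PySem.List.pyGetD suffix_sum (i + 1) 0 - PySem.List.pyGetD sorted_nums i 0 * (n - i - 1) else 0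
      PySem.List.pySetD res (PySem.List.pyGetD indices i 0) (left_sum + right_sum)) result

-- ===== PORT B =====
def sumOfDistances_alt (nums : List Int) : List Int :=
  nums.map (fun x => (nums.map (fun y => |x - y|)).sum)

-- ===== PRECONDITION & SPEC =====
-- Pre_ excludes only the empty list, on which A raises IndexError (it reads prefix_sum[0]).
def Pre_sumOfDistances (nums : List Int) : Prop := nums ≠ []
instance (nums : List Int) : Decidable (Pre_sumOfDistances nums) := by unfold Pre_sumOfDistances; infer_instance
def pvWitness_sumOfDistances : List Int := [3, 1, 2, 1]

def Spec_sumOfDistances (nums : List Int) (out : List Int) : Prop := out = sumOfDistances_alt nums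
instance (nums : List Int) (out : List Int) : Decidable (Spec_sumOfDistances nums out) := by unfold Spec_sumOfDistances; infer_instance

-- ===== CLAIM (what is proved, stated in full; the proofs are below) =====
def Claim_equal_sumOfDistances : Prop := ∀ (nums : List Int), Dom_sumOfDistances nums → Pre_sumOfDistances nums → Spec_sumOfDistances nums (sumOfDistances nums)

-- ===== LEMMAS AND PROOFS =====

theorem pv_pairwise_insertBy {α : Type} (before : α → α → Bool) (R : α → α → Prop)
    (htrans : ∀ a b c, R a b → R b c → R a c)
    (h1 : ∀ a b, before a b = true → R a b) (h2 : ∀ a b, before a b = false → R b a)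
    (x : α) (ys : List α) (hys : ys.Pairwise R) :
    (PySem.List.insertBy before x ys).Pairwise R := by
  induction ys with
  | nil => simp [PySem.List.insertBy]
  | cons y t ih =>
    rcases List.pairwise_cons.mp hys with ⟨hy, ht⟩
    by_cases hxy : before x y = true
    · rw [show PySem.List.insertBy before x (y :: t) = x :: y :: t from by
        simp [PySem.List.insertBy, hxy]]
      refine List.pairwise_cons.mpr ⟨?_, hys⟩
      intro z hz
      rcases List.mem_cons.mp hz with rfl | hz
      · exact h1 _ _ hxy
      · exact htrans _ _ _ (h1 _ _ hxy) (hy z hz)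
    · have hxy' : before x y = false := by simpa using hxy
      rw [show PySem.List.insertBy before x (y :: t) = y :: PySem.List.insertBy before x t from by
        simp [PySem.List.insertBy, hxy']]
      refine List.pairwise_cons.mpr ⟨?_, ih ht⟩
      intro z hz
      rcases (PySem.List.mem_insertBy before x z _).mp hz with rfl | hz
      · exact h2 _ _ hxy'
      · exact hy z hz

theorem pv_pairwise_foldl_insertBy {α : Type} (before : α → α → Bool) (R : α → α → Prop)
    (htrans : ∀ a b c, R a b → R b c → R a c)
    (h1 : ∀ a b, before a b = true → R a b) (h2 : ∀ a b, before a b = false → R b a)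
    (xs acc : List α) (hacc : acc.Pairwise R) :
    (xs.foldl (fun acc x => PySem.List.insertBy before x acc) acc).Pairwise R := by
  induction xs generalizing acc with
  | nil => simpa using hacc
  | cons x t ih =>
    simpa using ih _ (pv_pairwise_insertBy before R htrans h1 h2 x acc hacc)

theorem pv_sorted2_pairwise_fst (xs : List (Int × Int)) :
    (PySem.List.sorted2 xs Prod.fst Prod.snd).Pairwise (fun a b => a.1 ≤ b.1) := by
  have h := pv_pairwise_foldl_insertBy
    (fun a b : Int × Int => decide (a.1 < b.1) || (!decide (b.1 < a.1) && decide (a.2 < b.2)))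
    (fun a b : Int × Int => a.1 ≤ b.1)
    (fun a b c hab hbc => le_trans hab hbc)
    (by intro a b h; simp at h; rcases h with h | ⟨h, _⟩ <;> omega)
    (by intro a b h; simp at h; omega)
    xs [] (by simp)
  simpa [PySem.List.sorted2] using h

theorem pv_mem_enumerate {α : Type} (xs : List α) (s : Int) (p : Int × α)
    (hp : p ∈ PySem.List.enumerate xs s) :
    ∃ j : Nat, j < xs.length ∧ p.1 = s + j ∧ xs[j]? = some p.2 := by
  induction xs generalizing s with
  | nil => simp [PySem.List.enumerate] at hp
  | cons x t ih =>
    rw [PySem.List.enumerate_cons] at hp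
    rcases List.mem_cons.mp hp with rfl | hp
    · exact ⟨0, by simp, by simp, by simp⟩
    · obtain ⟨j, hj, he1, he2⟩ := ih (s + 1) hp
      exact ⟨j + 1, by simp [List.length_cons]; omega, by rw [he1]; push_cast; ring, by simpa using he2⟩

theorem pv_sum_map_sub_left (l : List Int) (v : Int) :
    (l.map (fun y => v - y)).sum = l.length * v - l.sum := by
  induction l with
  | nil => simp
  | cons a t ih => simp [ih]; ring

theorem pv_sum_map_sub_right (l : List Int) (v : Int) :
    (l.map (fun y => y - v)).sum = l.sum - l.length * v := by
  induction l with
  | nil => simp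
  | cons a t ih => simp [ih]; ring

theorem pv_core (s : List Int) (hs : s.Pairwise (· ≤ ·)) (i : Nat) (hi : i < s.length) :
    (s.map (fun y => |s[i] - y|)).sum
      = s[i] * i - (s.take i).sum + ((s.drop (i + 1)).sum - s[i] * ((s.length : Int) - i - 1)) := by
  set v := s[i] with hv
  have hdec : s.take i ++ v :: s.drop (i + 1) = s := by
    rw [hv, ← List.drop_eq_getElem_cons hi, List.take_append_drop]
  have hs' : (s.take i ++ v :: s.drop (i + 1)).Pairwise (· ≤ ·) := by rw [hdec]; exact hs
  obtain ⟨hp1, hp2, hp3⟩ := List.pairwise_append.mp hs'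
  have hle1 : ∀ y ∈ s.take i, y ≤ v := fun y hy => hp3 y hy v List.mem_cons_self
  have hle2 : ∀ y ∈ s.drop (i + 1), v ≤ y := (List.pairwise_cons.mp hp2).1
  have hsum : (s.map (fun y => |v - y|)).sum
      = ((s.take i).map (fun y => |v - y|)).sum + |v - v|
        + ((s.drop (i + 1)).map (fun y => |v - y|)).sum := by
    conv_lhs => rw [← hdec]
    simp [List.map_append, List.sum_append]
  rw [hsum]
  have e1 : ((s.take i).map (fun y => |v - y|)).sum = ((s.take i).map (fun y => v - y)).sum := by
    apply congrArg
    apply List.map_congr_left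
    intro y hy
    exact abs_of_nonneg (by have := hle1 y hy; omega)
  have e2 : ((s.drop (i + 1)).map (fun y => |v - y|)).sum
      = ((s.drop (i + 1)).map (fun y => y - v)).sum := by
    apply congrArg
    apply List.map_congr_left
    intro y hy
    have := hle2 y hy
    rw [abs_of_nonpos (by omega)]
    ring
  rw [e1, e2, pv_sum_map_sub_left, pv_sum_map_sub_right]
  have l1 : ((s.take i).length : Int) = (i : Int) := by rw [List.length_take]; omega
  have l2 : (((s.drop (i + 1)).length) : Int) = (s.length : Int) - i - 1 := by
    rw [List.length_drop]; omega
  rw [l1, l2]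
  simp
  ring

theorem pv_prefix_loop (s : List Int) (k : Nat) (h1 : 1 ≤ k) (hk : k ≤ s.length) :
    (PySem.List.pyRange 1 (k : Int) 1).foldl
      (fun ps i => PySem.List.pySetD ps i (PySem.List.pyGetD ps (i - 1) 0 + PySem.List.pyGetD s i 0))
      (PySem.List.pySetD (List.replicate s.length (0 : Int)) 0 (PySem.List.pyGetD s 0 0))
    = (List.range k).map (fun j => (s.take (j + 1)).sum) ++ List.replicate (s.length - k) 0 := by
  induction k with
  | zero => omega
  | succ k ih =>
    by_cases hk0 : k = 0
    · subst hk0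
      obtain ⟨a, t, rfl⟩ := List.exists_cons_of_ne_nil (show s ≠ [] by
        intro h; rw [h] at hk; simp at hk)
      have hr : PySem.List.pyRange 1 ((0 + 1 : Nat) : Int) 1 = [] :=
        PySem.List.pyRange_one_eq_nil (by norm_num)
      rw [hr]
      simp only [List.foldl_nil]
      rw [PySem.List.pySetD_of_nonneg _ _ (le_refl 0)]
      simp [List.replicate_succ, List.take_succ, List.set_cons_zero]
    · have h1' : 1 ≤ k := by omega
      have hkl : k < s.length := by omega
      have hsucc : PySem.List.pyRange 1 ((k + 1 : Nat) : Int) 1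
          = PySem.List.pyRange 1 (k : Int) 1 ++ [(k : Int)] := by
        rw [show ((k + 1 : Nat) : Int) = (k : Int) + 1 by push_cast; ring]
        exact PySem.List.pyRange_one_succ_right (by omega)
      rw [hsucc, List.foldl_append, ih h1' (by omega)]
      simp only [List.foldl_cons, List.foldl_nil]
      set M := (List.range k).map (fun j => (s.take (j + 1)).sum) with hM
      set Z := List.replicate (s.length - k) (0 : Int) with hZ
      have hMl : M.length = k := by rw [hM]; simp
      have hget1 : PySem.List.pyGetD (M ++ Z) ((k : Int) - 1) 0 = (s.take k).sum := by
        rw [show (k : Int) - 1 = ((k - 1 : Nat) : Int) by omega, PySem.List.pyGetD_natCast,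
          List.getD_append M Z 0 (k - 1) (by rw [hMl]; omega), hM,
          PySem.List.getD_map_range _ _ _ _ (by omega), show k - 1 + 1 = k by omega]
      have hget2 : PySem.List.pyGetD s (k : Int) 0 = s[k] := by
        rw [PySem.List.pyGetD_natCast, List.getD_eq_getElem _ _ hkl]
      rw [hget1, hget2, PySem.List.pySetD_natCast, List.set_append]
      rw [if_neg (by rw [hMl]; omega), hMl, Nat.sub_self]
      obtain ⟨m, hm⟩ : ∃ m, s.length - k = m + 1 := ⟨s.length - k - 1, by omega⟩
      rw [hZ, hm, List.replicate_succ, List.set_cons_zero]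
      have hfk : (s.take (k + 1)).sum = (s.take k).sum + s[k] := by
        rw [List.take_succ, List.getElem?_eq_getElem hkl, List.sum_append]
        simp
      rw [List.range_succ, List.map_append, List.append_assoc]
      congr 1
      simp only [List.map_cons, List.map_nil, List.cons_append, List.nil_append]
      rw [← hfk, show s.length - (k + 1) = m by omega]

theorem pv_suffix_loop (s : List Int) (k : Nat) (hk : k ≤ s.length - 1) (hn : 1 ≤ s.length) :
    (PySem.List.pyRange ((k : Int) - 1) (-1) (-1)).foldl
      (fun ss i => PySem.List.pySetD ss i (PySem.List.pyGetD ss (i + 1) 0 + PySem.List.pyGetD s i 0))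
      (List.replicate k (0 : Int) ++ (List.range (s.length - k)).map (fun j => (s.drop (k + j)).sum))
    = (List.range s.length).map (fun j => (s.drop j).sum) := by
  induction k with
  | zero =>
    rw [PySem.List.pyRange_neg_one_eq_nil (by omega)]
    simp
  | succ k ih =>
    have hkl : k + 1 < s.length := by omega
    have hcons : PySem.List.pyRange (((k + 1 : Nat) : Int) - 1) (-1) (-1)
        = (k : Int) :: PySem.List.pyRange ((k : Int) - 1) (-1) (-1) := by
      rw [show (((k + 1 : Nat) : Int) - 1) = (k : Int) by push_cast; ring]
      exact PySem.List.pyRange_neg_one_cons (by omega)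
    rw [hcons, List.foldl_cons]
    set R := List.replicate (k + 1) (0 : Int) with hR
    set M := (List.range (s.length - (k + 1))).map (fun j => (s.drop (k + 1 + j)).sum) with hM
    have hRl : R.length = k + 1 := by rw [hR]; simp
    have hget1 : PySem.List.pyGetD (R ++ M) ((k : Int) + 1) 0 = (s.drop (k + 1)).sum := by
      rw [show (k : Int) + 1 = ((k + 1 : Nat) : Int) by push_cast; ring, PySem.List.pyGetD_natCast,
        List.getD_append_right R M 0 (k + 1) (by omega), hRl, Nat.sub_self, hM,
        PySem.List.getD_map_range _ _ _ _ (by omega), Nat.add_zero]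
    have hget2 : PySem.List.pyGetD s (k : Int) 0 = s[k] := by
      rw [PySem.List.pyGetD_natCast, List.getD_eq_getElem _ _ (by omega)]
    rw [hget1, hget2, PySem.List.pySetD_natCast, List.set_append, if_pos (by omega)]
    have hv : (s.drop (k + 1)).sum + s[k] = (s.drop k).sum := by
      rw [List.drop_eq_getElem_cons (show k < s.length by omega), List.sum_cons]
      ring
    rw [hv]
    have hset : R.set k (s.drop k).sum = List.replicate k (0 : Int) ++ [(s.drop k).sum] := by
      rw [hR, List.replicate_succ', List.set_append, if_neg (by simp), List.length_replicate,
        Nat.sub_self, List.set_cons_zero]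
    rw [hset, List.append_assoc]
    have hMM : [(s.drop k).sum] ++ M = (List.range (s.length - k)).map (fun j => (s.drop (k + j)).sum) := by
      rw [show s.length - k = (s.length - (k + 1)) + 1 by omega, List.range_succ_eq_map, List.map_cons]
      simp only [Nat.add_zero, List.cons_append, List.nil_append, List.map_map]
      congr 1
      rw [hM]
      apply List.map_congr_left
      intro j _
      simp only [Function.comp_apply]
      congr 2
      omega
    rw [hMM]
    exact ih (by omega)

theorem pv_scatter (w : Int → Int) (js : List Int) (init : List Int)
    (hb : ∀ j ∈ js, 0 ≤ j ∧ j < (init.length : Int)) :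
    ((js.foldl (fun res j => PySem.List.pySetD res j (w j)) init).length = init.length) ∧
    (∀ p : Nat, (js.foldl (fun res j => PySem.List.pySetD res j (w j)) init).getD p 0
        = if (p : Int) ∈ js then w p else init.getD p 0) := by
  induction js generalizing init with
  | nil => simp
  | cons j t ih =>
    obtain ⟨hj0, hjlt⟩ := hb j List.mem_cons_self
    obtain ⟨ihlen, ihget⟩ := ih (PySem.List.pySetD init j (w j)) (by
      intro x hx
      rw [PySem.List.length_pySetD]
      exact hb x (List.mem_cons_of_mem _ hx))
    refine ⟨?_, ?_⟩
    · simp only [List.foldl_cons]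
      rw [ihlen, PySem.List.length_pySetD]
    · intro p
      simp only [List.foldl_cons]
      rw [ihget p]
      by_cases hpt : (p : Int) ∈ t
      · simp [hpt]
      · by_cases hpj : (p : Int) = j
        · rw [if_neg hpt, if_pos (by simp [hpj])]
          rw [PySem.List.pySetD_of_nonneg _ _ hj0]
          have hjp : j.toNat = p := by omega
          have hplt : p < init.length := by omega
          rw [hjp, List.getD_eq_getElem?_getD, List.getElem?_set, if_pos rfl, if_pos hplt]
          simp [← hpj]
        · rw [if_neg hpt, if_neg (by simp [hpj, hpt]), PySem.List.pySetD_of_nonneg _ _ hj0,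
            List.getD_eq_getElem?_getD, List.getElem?_set, if_neg (by omega), ← List.getD_eq_getElem?_getD]

theorem pv_set_last (m : Nat) (v : Int) (hm : 1 ≤ m) :
    (List.replicate m (0 : Int)).set (m - 1) v = List.replicate (m - 1) 0 ++ [v] := by
  obtain ⟨t, rfl⟩ : ∃ t, m = t + 1 := ⟨m - 1, by omega⟩
  rw [List.replicate_succ', List.set_append, if_neg (by simp)]
  simp

-- ===== VERDICT (by name: the statement is the Claim_ definition above) =====
theorem sumOfDistances_spec : Claim_equal_sumOfDistances := by
  intro nums _ hpre
  unfold Spec_sumOfDistances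
  simp only [sumOfDistances, sumOfDistances_alt]
  have hn : 1 ≤ nums.length := List.length_pos_of_ne_nil hpre
  set pairs := (PySem.List.enumerate nums).map (fun p => (p.2, p.1)) with hpairs
  set ys := PySem.List.sorted2 pairs Prod.fst Prod.snd with hysdef
  set s := ys.map Prod.fst with hsdef
  set idx := ys.map Prod.snd with hidxdef
  have hperm : ys.Perm pairs := PySem.List.sorted2_perm pairs Prod.fst Prod.snd false
  have hsp : s.Perm nums := by
    have h1 := hperm.map Prod.fst
    rw [hpairs] at h1
    have h2 : (List.map Prod.fst ys).Perm nums := by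
      simpa [List.map_map, Function.comp_def, PySem.List.map_snd_enumerate] using h1
    exact h2
  have hslen : s.length = nums.length := hsp.length_eq
  have hidxlen : idx.length = nums.length := by
    rw [hidxdef]
    have := (hperm.map Prod.snd).length_eq
    simp only [List.length_map] at this ⊢
    rw [this, hpairs]
    simp [PySem.List.length_enumerate]
  have hspw : s.Pairwise (· ≤ ·) := by
    rw [hsdef]
    exact List.pairwise_map.mpr (pv_sorted2_pairwise_fst pairs)
  have hq : ∀ q ∈ ys, ∃ j : Nat, j < nums.length ∧ q.2 = (j : Int) ∧ nums[j]? = some q.1 := by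
    intro q hqm
    have hqp : q ∈ pairs := hperm.subset hqm
    rw [hpairs] at hqp
    obtain ⟨p, hp, hpe⟩ := List.mem_map.mp hqp
    obtain ⟨j, hj, h1, h2⟩ := pv_mem_enumerate nums 0 p hp
    refine ⟨j, hj, ?_, ?_⟩
    · rw [← hpe]; simpa using h1
    · rw [← hpe]; simpa using h2
  have hidxmem : ∀ x ∈ idx, 0 ≤ x ∧ x < (nums.length : Int) := by
    rw [hidxdef]
    intro x hx
    obtain ⟨q, hq', rfl⟩ := List.mem_map.mp hx
    obtain ⟨j, hj, he, _⟩ := hq q hq'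
    rw [he]
    omega
  have hidxsurj : ∀ p : Nat, p < nums.length → (p : Int) ∈ idx := by
    intro p hp
    have hpm : idx.Perm (pairs.map Prod.snd) := by rw [hidxdef]; exact hperm.map Prod.snd
    rw [hpm.mem_iff, hpairs]
    simp only [List.map_map]
    have : ((fun p => (p.2, p.1)) : Int × Int → Int × Int) = (fun p : Int × Int => (p.2, p.1)) := rfl
    have hmfst : (PySem.List.enumerate nums).map (Prod.snd ∘ (fun p : Int × Int => (p.2, p.1)))
        = PySem.List.pyRange 0 (0 + nums.length) 1 := by
      rw [show (Prod.snd ∘ (fun p : Int × Int => (p.2, p.1))) = (fun x : Int × Int => x.1) from rfl]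
      exact PySem.List.map_fst_enumerate nums 0
    rw [hmfst, PySem.List.mem_pyRange_one]
    omega
  -- the prefix-sum loop
  have hPre : (PySem.List.pyRange 1 (nums.length : Int) 1).foldl
      (fun ps i => PySem.List.pySetD ps i (PySem.List.pyGetD ps (i - 1) 0 + PySem.List.pyGetD s i 0))
      (PySem.List.pySetD (List.replicate nums.length (0 : Int)) 0 (PySem.List.pyGetD s 0 0))
      = (List.range nums.length).map (fun j => (s.take (j + 1)).sum) := by
    have h := pv_prefix_loop s nums.length hn (le_of_eq hslen.symm)
    rw [hslen] at h
    simpa using h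
  -- the suffix-sum loop initial write
  have hSufInit : PySem.List.pySetD (List.replicate nums.length (0 : Int))
      ((nums.length : Int) - 1) (PySem.List.pyGetD s ((nums.length : Int) - 1) 0)
      = List.replicate (nums.length - 1) (0 : Int)
        ++ (List.range (nums.length - (nums.length - 1))).map
             (fun j => (s.drop ((nums.length - 1) + j)).sum) := by
    have hlt : nums.length - 1 < s.length := by omega
    have hg : PySem.List.pyGetD s ((nums.length : Int) - 1) 0 = (s.drop (nums.length - 1)).sum := by
      rw [show (nums.length : Int) - 1 = ((nums.length - 1 : Nat) : Int) by omega,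
        PySem.List.pyGetD_natCast, List.getD_eq_getElem _ _ hlt,
        List.drop_eq_getElem_cons hlt, show nums.length - 1 + 1 = s.length by omega,
        List.drop_length, List.sum_cons, List.sum_nil, add_zero]
    rw [hg, show (nums.length : Int) - 1 = ((nums.length - 1 : Nat) : Int) by omega,
      PySem.List.pySetD_natCast, pv_set_last nums.length _ hn,
      show nums.length - (nums.length - 1) = 1 by omega, List.range_one, List.map_cons, List.map_nil,
      Nat.add_zero]
  have hSuf : (PySem.List.pyRange ((nums.length : Int) - 2) (-1) (-1)).foldl
      (fun ss i => PySem.List.pySetD ss i (PySem.List.pyGetD ss (i + 1) 0 + PySem.List.pyGetD s i 0))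
      (List.replicate (nums.length - 1) (0 : Int)
        ++ (List.range (nums.length - (nums.length - 1))).map
             (fun j => (s.drop ((nums.length - 1) + j)).sum))
      = (List.range nums.length).map (fun j => (s.drop j).sum) := by
    have h := pv_suffix_loop s (nums.length - 1) (by omega) (by omega)
    rw [hslen] at h
    rw [show ((nums.length - 1 : Nat) : Int) - 1 = (nums.length : Int) - 2 by omega] at h
    exact h
  rw [hPre, hSufInit, hSuf]
  set w : Int → Int := fun j => (nums.map (fun y => |PySem.List.pyGetD nums j 0 - y|)).sum with hw
  have hcong : ∀ (acc : List Int), ∀ i ∈ PySem.List.pyRange 0 (nums.length : Int) 1,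
      (PySem.List.pySetD acc (PySem.List.pyGetD idx i 0)
        ((if i > 0 then PySem.List.pyGetD s i 0 * i
            - PySem.List.pyGetD ((List.range nums.length).map (fun j => (s.take (j + 1)).sum)) (i - 1) 0
          else 0)
         + (if i < (nums.length : Int) - 1 then
              PySem.List.pyGetD ((List.range nums.length).map (fun j => (s.drop j).sum)) (i + 1) 0
                - PySem.List.pyGetD s i 0 * ((nums.length : Int) - i - 1)
            else 0)))
      = PySem.List.pySetD acc (PySem.List.pyGetD idx i 0) (w (PySem.List.pyGetD idx i 0)) := by
    intro acc i hi
    rw [PySem.List.mem_pyRange_one] at hi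
    obtain ⟨hi0, hiN⟩ := hi
    have hii : i = ((i.toNat : Nat) : Int) := by omega
    set iN := i.toNat with hiNdef
    have hiNlt : iN < nums.length := by omega
    have hiNs : iN < s.length := by omega
    have hiNy : iN < ys.length := by
      have : ys.length = s.length := by rw [hsdef]; simp
      omega
    congr 1
    -- the written value equals w (idx[i])
    have hidxget : PySem.List.pyGetD idx i 0 = idx[iN]'(by omega) :=
      PySem.List.pyGetD_eq_getElem idx 0 hi0 (by omega)
    have hsget : PySem.List.pyGetD s i 0 = s[iN]'hiNs :=
      PySem.List.pyGetD_eq_getElem s 0 hi0 (by omega)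
    have hsy : s[iN] = (ys[iN]'hiNy).1 := by
      have : s[iN]'hiNs = (ys.map Prod.fst)[iN]'(by simpa [hsdef] using hiNs) := by
        congr 1
      rw [this, List.getElem_map]
    have hiy : idx[iN]'(by omega) = (ys[iN]'hiNy).2 := by
      have : idx[iN]'(by omega) = (ys.map Prod.snd)[iN]'(by simpa [hidxdef] using (by omega : iN < idx.length)) := by
        congr 1
      rw [this, List.getElem_map]
    obtain ⟨j, hj, hj2, hj1⟩ := hq (ys[iN]'hiNy) (List.getElem_mem hiNy)
    have hwval : w (idx[iN]'(by omega)) = (s.map (fun y => |s[iN] - y|)).sum := by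
      rw [hw]
      have hgn : PySem.List.pyGetD nums (idx[iN]'(by omega)) 0 = s[iN] := by
        rw [hiy, hj2, PySem.List.pyGetD_natCast, List.getD_eq_getElem?_getD, hj1, hsy]
        rfl
      simp only [hgn]
      exact ((hsp.map (fun y => |s[iN] - y|)).sum_eq).symm
    rw [hidxget, hsget, hwval]
    have hcore := pv_core s hspw iN hiNs
    -- reduce the two if-branches to the unconditional formulas
    have hL : (if i > 0 then s[iN] * i
          - PySem.List.pyGetD ((List.range nums.length).map (fun j => (s.take (j + 1)).sum)) (i - 1) 0
        else 0) = s[iN] * (iN : Int) - (s.take iN).sum := by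
      by_cases hpos : i > 0
      · rw [if_pos hpos]
        have : i - 1 = ((iN - 1 : Nat) : Int) := by omega
        rw [this, PySem.List.pyGetD_natCast,
          PySem.List.getD_map_range _ _ _ _ (by omega),
          show iN - 1 + 1 = iN by omega, hii]
      · rw [if_neg hpos]
        simp [show iN = 0 by omega]
    have hR : (if i < (nums.length : Int) - 1 then
          PySem.List.pyGetD ((List.range nums.length).map (fun j => (s.drop j).sum)) (i + 1) 0
            - s[iN] * ((nums.length : Int) - i - 1)
        else 0) = (s.drop (iN + 1)).sum - s[iN] * ((s.length : Int) - iN - 1) := by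
      by_cases hlt : i < (nums.length : Int) - 1
      · rw [if_pos hlt]
        have : i + 1 = ((iN + 1 : Nat) : Int) := by omega
        rw [this, PySem.List.pyGetD_natCast,
          PySem.List.getD_map_range _ _ _ _ (by omega), hii]
        congr 2
        omega
      · rw [if_neg hlt]
        have h1 : iN + 1 = s.length := by omega
        have h2 : (s.length : Int) - iN - 1 = 0 := by omega
        rw [h1, List.drop_length, h2, List.sum_nil]
        ring
    rw [hL, hR, hcore]
  rw [PySem.List.foldl_congr_mem _ _
      (fun res i => PySem.List.pySetD res (PySem.List.pyGetD idx i 0) (w (PySem.List.pyGetD idx i 0)))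
      _ hcong]
  have hlenidx : (nums.length : Int) = PySem.List.len idx := by
    rw [PySem.List.len_eq, hidxlen]
  rw [hlenidx, PySem.List.foldl_pyRange_zero_pyGetD idx 0
      (fun res j => PySem.List.pySetD res j (w j)) (List.replicate nums.length 0)]
  obtain ⟨hL, hG⟩ := pv_scatter w idx (List.replicate nums.length (0 : Int))
      (by intro x hx; rw [List.length_replicate]; exact hidxmem x hx)
  apply List.ext_getElem
  · rw [hL]
    simp
  · intro p h1 h2
    have hp : p < nums.length := by
      rw [hL, List.length_replicate] at h1
      exact h1
    rw [← List.getD_eq_getElem _ 0 h1, hG p, if_pos (hidxsurj p hp)]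
    rw [hw]
    simp only [List.getElem_map]
    congr 1
    rw [PySem.List.pyGetD_natCast, List.getD_eq_getElem _ _ hp]
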